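-- pv_equiv track=rewrite | github.com/Jackhammer9/Reduino | src/Reduino/transpile/parser.py | _cpp_type
-- ===== SOURCE A (Python) =====
-- def _is_list_type(label: str) -> bool:
--     """Return ``True`` if ``label`` represents a list type."""
--
--     return isinstance(label, str) and label.startswith("list[") and label.endswith("]")
--
-- def _list_element_type(label: str) -> str:
--     """Extract the contained element type label from a list ``label``."""
--
--     if not _is_list_type(label):
--         return "int"
--     return label[5:-1]
--
-- def _cpp_type(py_type: str) -> str:
--     """Translate a coarse Python type label into a C++ declaration type."""
--
--     if _is_list_type(py_type):
--         element_cpp = _cpp_type(_list_element_type(py_type))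
--         return f"__redu_list<{element_cpp}>"
--
--     mapping = {
--         "int": "int",
--         "float": "float",
--         "bool": "bool",
--         "String": "String",
--         "void": "void",
--     }
--     return mapping.get(py_type, "int")
-- ===== SOURCE B (Python) =====
-- def _cpp_type(py_type: str) -> str:
--     """Translate a coarse Python type label into a C++ declaration type."""
--
--     depth = 0
--     current = py_type
--     while current.startswith("list[") and current.endswith("]"):
--         current = current[5:len(current) - 1]
--         depth += 1
--     base = current if current in ("int", "float", "bool", "String", "void") else "int"
--     return "__redu_list<" * depth + base + ">" * depth
-- ===== Notes on version B (the rewrite author's own statement) =====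
-- stated objective: alternative
-- what changed: Replaced A's recursive descent with helper functions and a mapping dict by a single iterative peel loop (inline startswith/endswith test and [5:len-1] slice, counting depth), a tuple-membership test for the base type instead of dict.get, and string multiplication ('__redu_list<' * depth + base + '>' * depth) instead of recursive wrapping.
import Mathlib
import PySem

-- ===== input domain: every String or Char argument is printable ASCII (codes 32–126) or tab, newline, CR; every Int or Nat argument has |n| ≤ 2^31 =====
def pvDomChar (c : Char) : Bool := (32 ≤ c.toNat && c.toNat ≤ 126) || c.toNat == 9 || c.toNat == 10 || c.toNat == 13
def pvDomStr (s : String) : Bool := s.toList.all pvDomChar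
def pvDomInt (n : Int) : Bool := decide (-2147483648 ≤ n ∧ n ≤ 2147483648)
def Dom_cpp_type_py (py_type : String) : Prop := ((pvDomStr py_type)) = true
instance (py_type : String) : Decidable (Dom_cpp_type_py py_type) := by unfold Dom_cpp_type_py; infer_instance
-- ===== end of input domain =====

-- B replaces A's recursion+dict by an iterative peel-and-count loop, a tuple-membership base lookup and string multiplication (objective: alternative decomposition; same cost).

-- ===== PORT A =====
-- module helpers _is_list_type / _list_element_type of A, on List Char
def isListType (l : List Char) : Bool :=
  PySem.Chars.startswith l "list[".toList && PySem.Chars.endswith l "]".toList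

def listElementType (l : List Char) : List Char :=
  if isListType l then PySem.Chars.slice l (some 5) (some (-1)) else "int".toList

-- termination fact A's recursion cites: the peeled label is strictly shorter
theorem listElementType_len_lt (l : List Char) (h : isListType l = true) :
    (listElementType l).length < l.length := by
  have hsuf : ("]".toList) <:+ l := by
    have := (Bool.and_eq_true _ _).mp (by simpa [isListType] using h) |>.2
    exact (PySem.Chars.endswith_iff l _).mp this
  have hlen : 1 ≤ l.length := by
    simpa using List.IsSuffix.length_le hsuf
  simp only [listElementType, h, if_pos, PySem.Chars.slice_eq_listSlice,
    PySem.List.length_slice, PySem.List.clampIdx_neg_one]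
  have h5 := PySem.List.clampIdx_le l.length (5 : Int)
  omega

def pyMapping : PySem.Dict (List Char) (List Char) :=
  (((((PySem.Dict.empty.insert "int".toList "int".toList).insert
      "float".toList "float".toList).insert
      "bool".toList "bool".toList).insert
      "String".toList "String".toList).insert
      "void".toList "void".toList)

def cppTypeA (l : List Char) : List Char :=
  if h : isListType l = true then
    let elementCpp := cppTypeA (listElementType l)
    "__redu_list<".toList ++ elementCpp ++ ">".toList
  else
    pyMapping.getD l "int".toList
termination_by l.length
decreasing_by exact listElementType_len_lt l h

def cpp_type_py (py_type : String) : String := String.ofList (cppTypeA py_type.toList)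

-- ===== PORT B =====
-- one peeling step: current[5:len(current)-1]
def peelStep (cur : List Char) : List Char :=
  PySem.Chars.slice cur (some 5) (some ((cur.length : Int) - 1))

-- the peeled label is strictly shorter (termination of peelCount)
theorem peelStep_len_lt (cur : List Char)
    (h : (PySem.Chars.startswith cur "list[".toList
          && PySem.Chars.endswith cur "]".toList) = true) :
    (peelStep cur).length < cur.length := by
  have hsuf : ("]".toList) <:+ cur :=
    (PySem.Chars.endswith_iff cur _).mp ((Bool.and_eq_true _ _).mp h).2
  have hlen : 1 ≤ cur.length := by
    simpa using List.IsSuffix.length_le hsuf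
  simp only [peelStep, PySem.Chars.slice_eq_listSlice, PySem.List.length_slice,
    PySem.List.clampIdx]
  split_ifs <;> omega

-- while current.startswith("list[") and current.endswith("]"): peel, count
def peelCount (cur : List Char) (depth : Nat) : List Char × Nat :=
  if h : (PySem.Chars.startswith cur "list[".toList
          && PySem.Chars.endswith cur "]".toList) = true then
    peelCount (peelStep cur) (depth + 1)
  else
    (cur, depth)
termination_by cur.length
decreasing_by exact peelStep_len_lt cur h

-- current if current in ("int","float","bool","String","void") else "int"
def baseType (cur : List Char) : List Char :=
  if cur = "int".toList ∨ cur = "float".toList ∨ cur = "bool".toList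
     ∨ cur = "String".toList ∨ cur = "void".toList then cur else "int".toList

def cppTypeB (l : List Char) : List Char :=
  let (cur, depth) := peelCount l 0
  PySem.List.pyRepeat "__redu_list<".toList (depth : Int)
    ++ baseType cur ++ PySem.List.pyRepeat ">".toList (depth : Int)

def cpp_type_py_alt (py_type : String) : String := String.ofList (cppTypeB py_type.toList)

-- ===== PRECONDITION & SPEC =====
def Spec_cpp_type_py (py_type : String) (out : String) : Prop := out = cpp_type_py_alt py_type
instance (py_type : String) (out : String) : Decidable (Spec_cpp_type_py py_type out) := by unfold Spec_cpp_type_py; infer_instance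

-- ===== CLAIM (what is proved, stated in full; the proofs are below) =====
def Claim_equal_cpp_type_py : Prop := ∀ (py_type : String), Dom_cpp_type_py py_type → Spec_cpp_type_py py_type (cpp_type_py py_type)

-- ===== LEMMAS AND PROOFS =====
theorem pyRepeat_natCast_succ (s : List Char) (d : Nat) :
    PySem.List.pyRepeat s ((d + 1 : Nat) : Int) = s ++ PySem.List.pyRepeat s (d : Int) := by
  simp [PySem.List.pyRepeat, List.replicate_succ]

-- the dict lookup of A equals the membership test of B (values coincide with keys)
theorem getD_mapping_eq_baseType (cur : List Char) :
    pyMapping.getD cur "int".toList = baseType cur := by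
  simp only [pyMapping, PySem.Dict.getD_insert, baseType]
  by_cases h1 : cur = "void".toList <;>
  by_cases h2 : cur = "String".toList <;>
  by_cases h3 : cur = "bool".toList <;>
  by_cases h4 : cur = "float".toList <;>
  by_cases h5 : cur = "int".toList <;>
  simp_all [PySem.Dict.getD, PySem.Dict.get?, PySem.Dict.empty]

-- under the loop guard, B's slice cur[5:len-1] equals A's label[5:-1]
theorem peelStep_eq_listElementType (cur : List Char) (h : isListType cur = true) :
    peelStep cur = listElementType cur := by
  have hsuf : ("]".toList) <:+ cur := by
    have := (Bool.and_eq_true _ _).mp (by simpa [isListType] using h) |>.2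
    exact (PySem.Chars.endswith_iff cur _).mp this
  have hlen : 1 ≤ cur.length := by
    simpa using List.IsSuffix.length_le hsuf
  have hc : PySem.List.clampIdx cur.length ((cur.length : Int) - 1)
      = PySem.List.clampIdx cur.length (-1) := by
    simp only [PySem.List.clampIdx]
    split_ifs <;> omega
  simp only [peelStep, listElementType, h, if_pos, PySem.Chars.slice_eq_listSlice,
    PySem.List.slice, hc]

theorem pyRepeat_append_comm (s : List Char) (d : Nat) :
    PySem.List.pyRepeat s (d : Int) ++ s = s ++ PySem.List.pyRepeat s (d : Int) := by
  have h1 : (List.replicate d s).flatten ++ s = (List.replicate (d + 1) s).flatten := by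
    rw [List.replicate_succ']; simp
  have h2 : (List.replicate (d + 1) s).flatten = s ++ (List.replicate d s).flatten := by
    simp [List.replicate_succ]
  simpa [PySem.List.pyRepeat] using h1.trans h2

theorem append_rearrange (r s X : List Char) (hcomm : r ++ s = s ++ r) :
    r ++ (s ++ X) = s ++ (r ++ X) := by
  rw [← List.append_assoc, hcomm, List.append_assoc]

-- A's recursion, wrapped d times, equals finishing B's loop from state (l, d)
theorem cppTypeA_peel (l : List Char) (d : Nat) :
    PySem.List.pyRepeat "__redu_list<".toList (d : Int) ++ cppTypeA l
      ++ PySem.List.pyRepeat ">".toList (d : Int) =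
    (fun p : List Char × Nat =>
      PySem.List.pyRepeat "__redu_list<".toList ((p.2 : Nat) : Int) ++ baseType p.1
        ++ PySem.List.pyRepeat ">".toList ((p.2 : Nat) : Int)) (peelCount l d) := by
  by_cases h : isListType l = true
  · have hg : (PySem.Chars.startswith l "list[".toList
        && PySem.Chars.endswith l "]".toList) = true := by simpa [isListType] using h
    rw [cppTypeA, dif_pos h, peelCount, dif_pos hg, peelStep_eq_listElementType l h,
      ← cppTypeA_peel (listElementType l) (d + 1),
      pyRepeat_natCast_succ, pyRepeat_natCast_succ]
    simp only [List.append_assoc]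
    exact append_rearrange _ _ _ (pyRepeat_append_comm _ d)
  · have hg : ¬ (PySem.Chars.startswith l "list[".toList
        && PySem.Chars.endswith l "]".toList) = true := by simpa [isListType] using h
    rw [cppTypeA, dif_neg h, peelCount, dif_neg hg, getD_mapping_eq_baseType]
termination_by l.length
decreasing_by exact listElementType_len_lt l h

theorem cppTypeA_eq_cppTypeB (l : List Char) : cppTypeA l = cppTypeB l := by
  have h := cppTypeA_peel l 0
  rcases hp : peelCount l 0 with ⟨cur, dep⟩
  rw [hp] at h
  simpa [cppTypeB, hp, PySem.List.pyRepeat] using h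

-- ===== VERDICT (by name: the statement is the Claim_ definition above) =====
theorem cpp_type_py_spec : Claim_equal_cpp_type_py := by
  intro py_type _
  unfold Spec_cpp_type_py cpp_type_py cpp_type_py_alt
  rw [cppTypeA_eq_cppTypeB]
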